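-- pv_equiv track=rewrite | github.com/recombee/lstm-models | src/src/helpers/dataStore.py | end_with_x
-- ===== SOURCE A (Python) =====
-- def end_with_x(d, x):
--     """
--     Sequence end with x and all not x type at the end remove.
--     """
--
--     ret = d.copy()
--     indexes = set()
--     for i in range(len(ret)-1, -1, -1):
--         if ret[i]['type'] == x:
--             break
--         else:
--             indexes.add(i)
--     return remove_from_from_list(ret, indexes)
--
-- def remove_from_from_list(d, indexes):
--     # remove indexes from list
--     return [x for i, x in enumerate(d) if i not in indexes]
-- ===== SOURCE B (Python) =====
-- def end_with_x(d, x):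
--     """
--     Sequence end with x and all not x type at the end remove.
--     """
--     cut = 0
--     for i, e in enumerate(d):
--         if e.get('type') == x:
--             cut = i + 1
--     return d[:cut]
-- ===== Notes on version B (the rewrite author's own statement) =====
-- stated objective: simpler
-- what changed: B replaces A's backward break-scan that collects a set of trailing indexes followed by a full filtering comprehension with a single forward pass that remembers the index after the last element whose .get('type') equals x and returns one slice d[:cut]; no set, no helper, no break.
import Mathlib
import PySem

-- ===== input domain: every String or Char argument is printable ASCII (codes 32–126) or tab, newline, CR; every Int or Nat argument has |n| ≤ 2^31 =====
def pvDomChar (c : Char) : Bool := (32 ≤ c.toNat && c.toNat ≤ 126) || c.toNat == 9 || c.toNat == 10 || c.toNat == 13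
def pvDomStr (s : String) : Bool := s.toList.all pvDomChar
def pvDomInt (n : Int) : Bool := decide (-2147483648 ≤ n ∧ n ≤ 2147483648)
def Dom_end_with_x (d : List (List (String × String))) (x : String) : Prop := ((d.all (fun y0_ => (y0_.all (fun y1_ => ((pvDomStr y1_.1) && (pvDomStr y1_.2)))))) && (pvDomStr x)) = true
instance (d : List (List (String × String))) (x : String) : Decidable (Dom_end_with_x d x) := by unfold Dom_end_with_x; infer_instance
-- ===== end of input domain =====

-- B replaces A's backward break-scan + index-set + filtering comprehension by one forward pass
-- remembering the index after the last matching element, then a single slice (objective: simpler).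

-- ===== PORT A =====
-- ret[i]['type'] : first-match lookup in the association list; "" stands for the KeyError case, excluded by Pre_
def aType (e : List (String × String)) : String := PySem.Dict.getD (PySem.Dict.mk e) "type" ""

-- the loop 'for i in range(len(ret)-1, -1, -1): if …: break else indexes.add(i)'; aScan d x k scans indices k-1 … 0
def aScan (d : List (List (String × String))) (x : String) : Nat → PySem.Set Int
  | 0 => PySem.Set.empty
  | Nat.succ i => if aType (d.getD i []) == x then PySem.Set.empty
                  else PySem.Set.add (aScan d x i) (i : Int)

def end_with_x (d : List (List (String × String))) (x : String) : List (List (String × String)) :=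
  -- ret = d.copy(); indexes = aScan …; remove_from_from_list: [x for i, x in enumerate(ret) if i not in indexes]
  ((PySem.List.enumerate d).filter (fun p => !(PySem.Set.contains (aScan d x d.length) p.1))).map (·.2)

-- ===== PORT B =====
def end_with_x_alt (d : List (List (String × String))) (x : String) : List (List (String × String)) :=
  -- cut = 0; for i, e in enumerate(d): if e.get('type') == x: cut = i + 1;  return d[:cut]
  PySem.List.slice d none (some
    ((PySem.List.enumerate d).foldl
      (fun cut p => if PySem.Dict.get? (PySem.Dict.mk p.2) "type" == some x then p.1 + 1 else cut) 0))

-- ===== PRECONDITION & SPEC =====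
-- Pre_ excludes exactly the inputs on which A raises KeyError: an element without a 'type' key that A's
-- backward scan reaches before any element whose 'type' equals x (B would return a value there).
def Pre_end_with_x (d : List (List (String × String))) (x : String) : Prop :=
  ∀ i < d.length, PySem.Dict.get? (PySem.Dict.mk (d.getD i [])) "type" = none →
    ∃ j < d.length, i < j ∧
      (PySem.Dict.get? (PySem.Dict.mk (d.getD j [])) "type" = none ∨
       PySem.Dict.get? (PySem.Dict.mk (d.getD j [])) "type" = some x)
instance (d : List (List (String × String))) (x : String) : Decidable (Pre_end_with_x d x) := by unfold Pre_end_with_x; infer_instance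

def pvWitness_end_with_x : (List (List (String × String))) × String := ([[("type", "a")], [("type", "b")]], "b")

def Spec_end_with_x (d : List (List (String × String))) (x : String) (out : List (List (String × String))) : Prop := out = end_with_x_alt d x
instance (d : List (List (String × String))) (x : String) (out : List (List (String × String))) : Decidable (Spec_end_with_x d x out) := by unfold Spec_end_with_x; infer_instance

-- ===== CLAIM (what is proved, stated in full; the proofs are below) =====
def Claim_equal_end_with_x : Prop := ∀ (d : List (List (String × String))) (x : String), Dom_end_with_x d x → Pre_end_with_x d x → Spec_end_with_x d x (end_with_x d x)

-- ===== LEMMAS AND PROOFS =====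

-- A's break index: bCut d x k scans indices k-1 … 0, returns i+1 at the first i with getD-'type' == x, else 0
def bCut (d : List (List (String × String))) (x : String) : Nat → Nat
  | 0 => 0
  | Nat.succ i => if aType (d.getD i []) == x then i + 1 else bCut d x i

-- B's criterion as a backward recursion: gCut uses get? = some x (never a default value)
def gCut (d : List (List (String × String))) (x : String) : Nat → Nat
  | 0 => 0
  | Nat.succ i => if PySem.Dict.get? (PySem.Dict.mk (d.getD i [])) "type" == some x then i + 1 else gCut d x i

theorem bCut_le (d : List (List (String × String))) (x : String) : ∀ k, bCut d x k ≤ k := by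
  intro k
  induction k with
  | zero => simp [bCut]
  | succ i ih => simp only [bCut]; split <;> omega

theorem mem_aScan (d : List (List (String × String))) (x : String) :
    ∀ (k : Nat) (m : Int), m ∈ aScan d x k ↔ (bCut d x k : Int) ≤ m ∧ m < (k : Nat) := by
  intro k
  induction k with
  | zero =>
    intro m
    simp only [aScan, bCut, PySem.Set.empty, List.not_mem_nil, false_iff, Nat.cast_zero]
    omega
  | succ i ih =>
    intro m
    have hble := bCut_le d x i
    simp only [aScan, bCut]
    by_cases h : (aType (d.getD i []) == x) = true
    · rw [if_pos h, if_pos h]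
      simp only [PySem.Set.empty, List.not_mem_nil, false_iff]
      push_cast
      omega
    · rw [if_neg h, if_neg h]
      rw [PySem.Set.mem_add, ih m]
      push_cast
      omega

theorem filter_enumerate_lt (α : Type) (l : List α) :
    ∀ (s c : Int),
      ((PySem.List.enumerate l s).filter (fun p => decide (p.1 < c))).map (·.2)
        = l.take (c - s).toNat := by
  induction l with
  | nil => intro s c; simp [PySem.List.enumerate_nil]
  | cons a l ih =>
    intro s c
    rw [PySem.List.enumerate_cons]
    by_cases h : s < c
    · have h1 : (c - s).toNat = ((c - (s + 1)).toNat) + 1 := by omega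
      simp [h, ih (s + 1) c, h1]
    · have h0 : (c - s).toNat = 0 := by omega
      have h1 : (c - (s + 1)).toNat = 0 := by omega
      simp [h, ih (s + 1) c, h0, h1]

-- A computes d.take (bCut d x d.length)  (no precondition needed)
theorem end_with_x_eq_take (d : List (List (String × String))) (x : String) :
    end_with_x d x = d.take (bCut d x d.length) := by
  unfold end_with_x
  have hfc : (PySem.List.enumerate d).filter (fun p => !(PySem.Set.contains (aScan d x d.length) p.1))
      = (PySem.List.enumerate d).filter (fun p => decide (p.1 < (bCut d x d.length : Int))) := by
    apply List.filter_congr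
    intro p hp
    rcases (PySem.List.mem_enumerate_iff _ _ _).mp hp with ⟨k, hk, rfl⟩
    have hb := bCut_le d x d.length
    rw [Bool.eq_iff_iff, Bool.not_eq_true', Bool.eq_false_iff]
    simp only [Ne, PySem.Set.contains_iff, mem_aScan, decide_eq_true_eq]
    omega
  rw [hfc, filter_enumerate_lt]
  norm_num

-- gCut only looks at indices below k, so appending an element does not change it
theorem gCut_append (l : List (List (String × String))) (a : List (String × String)) (x : String) :
    ∀ k, k ≤ l.length → gCut (l ++ [a]) x k = gCut l x k := by
  intro k
  induction k with
  | zero => intro _; rfl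
  | succ i ih =>
    intro h
    have hi : i < l.length := by omega
    have hg : (l ++ [a]).getD i [] = l.getD i [] := by
      simp [List.getD_eq_getElem?_getD, List.getElem?_append_left hi]
    simp only [gCut, hg]
    split
    · rfl
    · exact ih (by omega)

-- B's forward fold computes gCut d x d.length
theorem foldl_eq_gCut (d : List (List (String × String))) (x : String) :
    (PySem.List.enumerate d).foldl
      (fun cut p => if PySem.Dict.get? (PySem.Dict.mk p.2) "type" == some x then p.1 + 1 else cut) 0
      = (gCut d x d.length : Int) := by
  induction d using List.reverseRecOn with
  | nil => simp [PySem.List.enumerate_nil, gCut]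
  | append_singleton l a ih =>
    rw [PySem.List.enumerate_append, List.foldl_append, ih]
    have hg : (l ++ [a]).getD l.length [] = a := by
      simp [List.getD_eq_getElem?_getD]
    have hlen : (l ++ [a]).length = l.length + 1 := by simp
    rw [hlen]
    simp only [PySem.List.enumerate_cons, PySem.List.enumerate_nil, List.foldl_cons,
      List.foldl_nil, gCut, hg, gCut_append l a x l.length le_rfl]
    split
    · push_cast; ring
    · rfl

-- aType unfolded to the Option-valued lookup
theorem aType_eq (e : List (String × String)) :
    aType e = (PySem.Dict.get? (PySem.Dict.mk e) "type").getD "" :=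
  PySem.Dict.getD_eq_get?_getD _ _ _

-- under Pre_, the break index equals the last-forward-match index
theorem bCut_eq_gCut_aux (d : List (List (String × String))) (x : String)
    (hpre : Pre_end_with_x d x) :
    ∀ k, k ≤ d.length → (∀ j, k ≤ j → j < d.length → (aType (d.getD j []) == x) = false) →
      bCut d x k = gCut d x k := by
  intro k
  induction k with
  | zero => intro _ _; rfl
  | succ i ih =>
    intro hk H
    by_cases hb : (PySem.Dict.get? (PySem.Dict.mk (d.getD i [])) "type" == some x) = true
    · have ha : (aType (d.getD i []) == x) = true := by
        rw [beq_iff_eq] at hb ⊢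
        rw [aType_eq, hb, Option.getD_some]
      simp only [bCut, gCut, if_pos ha, if_pos hb]
    · by_cases ha : (aType (d.getD i []) == x) = true
      · -- getD-match but not get?-match: the key is missing and x = "", impossible under Pre_
        exfalso
        rw [beq_iff_eq, aType_eq] at ha
        have hnone : PySem.Dict.get? (PySem.Dict.mk (d.getD i [])) "type" = none := by
          cases hv : PySem.Dict.get? (PySem.Dict.mk (d.getD i [])) "type" with
          | none => rfl
          | some v =>
            exfalso
            apply hb
            rw [hv, Option.getD_some] at ha
            rw [beq_iff_eq, hv, ha]
        rw [hnone, Option.getD_none] at ha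
        obtain ⟨j, hjlen, hij, hj⟩ := hpre i (by omega) hnone
        have hja := H j (by omega) hjlen
        rw [Bool.eq_false_iff, Ne, beq_iff_eq, aType_eq] at hja
        rcases hj with hj | hj
        · exact hja (by rw [hj, Option.getD_none, ha])
        · exact hja (by rw [hj, Option.getD_some])
      · rw [Bool.not_eq_true] at ha hb
        simp only [bCut, gCut, ha, hb, Bool.false_eq_true, if_false]
        refine ih (by omega) ?_
        intro j hji hjlen
        rcases Nat.eq_or_lt_of_le hji with rfl | h
        · exact ha
        · exact H j h hjlen

theorem bCut_eq_gCut (d : List (List (String × String))) (x : String) (hpre : Pre_end_with_x d x) :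
    bCut d x d.length = gCut d x d.length := by
  exact bCut_eq_gCut_aux d x hpre d.length le_rfl (fun j hj hjl => absurd hjl (by omega))

-- ===== VERDICT (by name: the statement is the Claim_ definition above) =====
theorem end_with_x_spec : Claim_equal_end_with_x := by
  intro d x _ hpre
  unfold Spec_end_with_x end_with_x_alt
  rw [end_with_x_eq_take, foldl_eq_gCut, ← bCut_eq_gCut d x hpre]
  rw [PySem.List.slice_to_natCast]
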